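-- pv_equiv track=rewrite | github.com/dbwjd323/Algorithm | 백준/Silver/2578. 빙고/빙고.py | check
-- ===== SOURCE A (Python) =====
-- def check(c):
--     bingo = 0
--     # 가로 체크
--     for i in c:
--         if i.count(0) == 5:
--             bingo += 1
--
--     # 세로 체크
--     for i in range(5):
--         count = 0
--         for j in range(5):
--             if c[j][i] == 0:
--                 count += 1
--         if count == 5:
--             bingo += 1
--
--     # 왼쪽 대각선 체크
--     count = 0
--     for i in range(5):
--         if c[i][i] == 0:
--             count += 1
--     if count == 5:
--         bingo += 1
--
--     # 오른쪽 대각선 체크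
--     count = 0
--     for i in range(5):
--         if c[i][4 - i] == 0:
--             count += 1
--     if count == 5:
--         bingo += 1
--
--     return bingo
-- ===== SOURCE B (Python) =====
-- # B: precomputed line sets + a zero-cell set, counted by subset tests.
-- _LINES = (
--     [frozenset((i, j) for j in range(5)) for i in range(5)]       # rows
--     + [frozenset((j, i) for j in range(5)) for i in range(5)]     # columns
--     + [frozenset((i, i) for i in range(5)),                       # main diagonal
--        frozenset((i, 4 - i) for i in range(5))]                   # anti-diagonal
-- )
--
-- def check(c):
--     zeros = {(i, j) for i in range(5) for j in range(5) if c[i][j] == 0}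
--     return sum(1 for line in _LINES if line <= zeros)
-- ===== Notes on version B (the rewrite author's own statement) =====
-- stated objective: alternative
-- what changed: Replaces A's four differently-shaped index-loop passes with a precomputed table of the 12 bingo lines as coordinate frozensets plus one scan that collects the zero cells into a set, counting lines by subset tests.
import Mathlib
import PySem

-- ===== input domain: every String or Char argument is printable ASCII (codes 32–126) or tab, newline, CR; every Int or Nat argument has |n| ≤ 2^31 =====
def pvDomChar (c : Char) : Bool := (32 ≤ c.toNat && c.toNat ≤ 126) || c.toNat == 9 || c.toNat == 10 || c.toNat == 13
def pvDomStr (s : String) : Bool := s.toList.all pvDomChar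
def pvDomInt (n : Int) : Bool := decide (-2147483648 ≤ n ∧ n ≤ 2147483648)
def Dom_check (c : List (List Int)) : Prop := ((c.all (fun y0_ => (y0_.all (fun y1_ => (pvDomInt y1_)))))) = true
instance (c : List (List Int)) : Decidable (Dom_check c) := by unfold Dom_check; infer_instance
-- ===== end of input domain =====

-- B precomputes the 12 bingo lines as coordinate SETS, builds the set of zero cells in one
-- scan of the board, and counts lines by SUBSET tests — instead of A's four differently
-- shaped index-loop passes (alternative uniform decomposition; same O(1) cost).

-- ===== PORT A =====
def check (c : List (List Int)) : Int :=
  -- 가로 체크: for i in c: if i.count(0) == 5: bingo += 1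
  let bingo : Int := c.foldl (fun b i => if PySem.List.count i (0 : Int) = 5 then b + 1 else b) 0
  -- 세로 체크
  let bingo : Int := (PySem.List.pyRange 0 5 1).foldl (fun b i =>
      let count : Int := (PySem.List.pyRange 0 5 1).foldl (fun cnt j =>
          if PySem.List.pyGetD (PySem.List.pyGetD c j []) i 1 = 0 then cnt + 1 else cnt) 0
      if count = 5 then b + 1 else b) bingo
  -- 왼쪽 대각선 체크
  let count : Int := (PySem.List.pyRange 0 5 1).foldl (fun cnt i =>
      if PySem.List.pyGetD (PySem.List.pyGetD c i []) i 1 = 0 then cnt + 1 else cnt) 0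
  let bingo : Int := if count = 5 then bingo + 1 else bingo
  -- 오른쪽 대각선 체크
  let count : Int := (PySem.List.pyRange 0 5 1).foldl (fun cnt i =>
      if PySem.List.pyGetD (PySem.List.pyGetD c i []) (4 - i) 1 = 0 then cnt + 1 else cnt) 0
  if count = 5 then bingo + 1 else bingo

-- ===== PORT B =====
-- _LINES: the 12 bingo lines as frozensets of coordinates (module-level constant in Source B)
def pvLines : List (PySem.Set (Int × Int)) :=
  ((PySem.List.pyRange 0 5 1).map (fun i =>
      PySem.Set.ofList ((PySem.List.pyRange 0 5 1).map (fun j => (i, j)))))       -- rows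
  ++ ((PySem.List.pyRange 0 5 1).map (fun i =>
      PySem.Set.ofList ((PySem.List.pyRange 0 5 1).map (fun j => (j, i)))))       -- columns
  ++ [PySem.Set.ofList ((PySem.List.pyRange 0 5 1).map (fun i => (i, i))),        -- main diagonal
      PySem.Set.ofList ((PySem.List.pyRange 0 5 1).map (fun i => (i, 4 - i)))]    -- anti-diagonal

def check_alt (c : List (List Int)) : Int :=
  -- zeros = {(i, j) for i in range(5) for j in range(5) if c[i][j] == 0}
  let zeros : PySem.Set (Int × Int) :=
    PySem.Set.ofList ((PySem.List.pyRange 0 5 1).flatMap (fun i =>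
      ((PySem.List.pyRange 0 5 1).filter (fun j =>
        PySem.List.pyGetD (PySem.List.pyGetD c i []) j 1 == 0)).map (fun j => ((i, j) : Int × Int))))
  -- return sum(1 for line in _LINES if line <= zeros)
  pvLines.foldl (fun n line => if PySem.Set.issubset line zeros then n + 1 else n) 0

-- ===== PRECONDITION & SPEC =====
-- Pre_ restricts to genuine 5×5 bingo boards. A raises (IndexError) on boards with fewer
-- than 5 rows or a short row; on oversized boards (extra rows, or rows longer than 5) A
-- still returns, but its value there is an accident of its shape-mixed passes (the row
-- pass scans ALL rows and tests 'exactly five zeros', while the other passes read only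
-- the first 5×5 cells) — a corner no caller with a bingo board reaches, where B's
-- first-25-cells reading is equally defensible; those inputs are excluded.
def Pre_check (c : List (List Int)) : Prop :=
  c.length = 5 ∧ ∀ r ∈ c, r.length = 5
instance (c : List (List Int)) : Decidable (Pre_check c) := by unfold Pre_check; infer_instance

def pvWitness_check : List (List Int) :=
  [[0, 1, 2, 3, 4], [0, 0, 0, 0, 0], [5, 6, 0, 7, 8], [1, 1, 1, 1, 0], [0, 2, 0, 2, 0]]

def Spec_check (c : List (List Int)) (out : Int) : Prop := out = check_alt c
instance (c : List (List Int)) (out : Int) : Decidable (Spec_check c out) := by unfold Spec_check; infer_instance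

-- ===== CLAIM (what is proved, stated in full; the proofs are below) =====
def Claim_equal_check : Prop := ∀ (c : List (List Int)), Dom_check c → Pre_check c → Spec_check c (check c)

-- ===== LEMMAS AND PROOFS =====

theorem cnt5_natflat (p1 p2 p3 p4 p5 : Prop) [Decidable p1] [Decidable p2] [Decidable p3] [Decidable p4] [Decidable p5] :
    ((((((if p5 then (1:Nat) else 0) + if p4 then 1 else 0) + if p3 then 1 else 0) + if p2 then 1 else 0) + if p1 then 1 else 0) = 5)
      ↔ (p1 ∧ p2 ∧ p3 ∧ p4 ∧ p5) := by
  split_ifs <;> norm_num <;> tauto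

-- if-increment as addition of an indicator
theorem ite_addone (p : Prop) [Decidable p] (x : Int) :
    (if p then x + 1 else x) = x + (if p then (1:Int) else 0) := by
  split_ifs <;> ring

-- membership in B's zero-cell comprehension, characterized without unfolding the ranges
theorem mem_zeros (c : List (List Int)) (x y : Int) :
    ((x, y) ∈ ([0,1,2,3,4] : List Int).flatMap (fun i =>
        (([0,1,2,3,4] : List Int).filter (fun j =>
          PySem.List.pyGetD (PySem.List.pyGetD c i []) j 1 == 0)).map (fun j => ((i, j) : Int × Int)))) ↔
    (x ∈ ([0,1,2,3,4] : List Int) ∧ y ∈ ([0,1,2,3,4] : List Int) ∧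
      PySem.List.pyGetD (PySem.List.pyGetD c x []) y 1 = 0) := by
  simp only [List.mem_flatMap, List.mem_map, List.mem_filter, beq_iff_eq, Prod.mk.injEq]
  constructor
  · rintro ⟨i, hi, j, ⟨hj, hc⟩, rfl, rfl⟩; exact ⟨hi, hj, hc⟩
  · rintro ⟨hx, hy, hc⟩; exact ⟨x, hx, y, ⟨hy, hc⟩, rfl, rfl⟩

-- A's row test 'count(0) == 5' on a 5-element row, as five cell conditions
theorem count5 (r : List Int) (h : r.length = 5) :
    (List.count (0 : Int) r = 5) ↔
      (r[0]?.getD 1 = 0 ∧ r[1]?.getD 1 = 0 ∧ r[2]?.getD 1 = 0 ∧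
       r[3]?.getD 1 = 0 ∧ r[4]?.getD 1 = 0) := by
  rcases r with _|⟨x0,_|⟨x1,_|⟨x2,_|⟨x3,_|⟨x4,_|⟨x5,r⟩⟩⟩⟩⟩⟩ <;> simp at h
  norm_num [List.count_cons, cnt5_natflat]

theorem cnt5_intflat (p1 p2 p3 p4 p5 : Prop) [Decidable p1] [Decidable p2] [Decidable p3] [Decidable p4] [Decidable p5] :
    ((((((if p5 then (1:Int) else 0) + if p4 then 1 else 0) + if p3 then 1 else 0) + if p2 then 1 else 0) + if p1 then 1 else 0) = 5)
      ↔ (p1 ∧ p2 ∧ p3 ∧ p4 ∧ p5) := by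
  split_ifs <;> norm_num <;> tauto

set_option maxHeartbeats 1000000 in
theorem check_eq_alt (c : List (List Int)) (h1 : c.length = 5) (h2 : ∀ r ∈ c, r.length = 5) :
    check c = check_alt c := by
  rcases c with _|⟨r0,_|⟨r1,_|⟨r2,_|⟨r3,_|⟨r4,_|⟨r5,c⟩⟩⟩⟩⟩⟩ <;> simp at h1
  have h0 := h2 r0 (by simp); have h1' := h2 r1 (by simp); have h2' := h2 r2 (by simp)
  have h3 := h2 r3 (by simp); have h4 := h2 r4 (by simp)
  have hr : PySem.List.pyRange 0 5 1 = [0,1,2,3,4] := by decide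
  have hl : pvLines =
      [[(0,0),(0,1),(0,2),(0,3),(0,4)], [(1,0),(1,1),(1,2),(1,3),(1,4)],
       [(2,0),(2,1),(2,2),(2,3),(2,4)], [(3,0),(3,1),(3,2),(3,3),(3,4)],
       [(4,0),(4,1),(4,2),(4,3),(4,4)],
       [(0,0),(1,0),(2,0),(3,0),(4,0)], [(0,1),(1,1),(2,1),(3,1),(4,1)],
       [(0,2),(1,2),(2,2),(3,2),(4,2)], [(0,3),(1,3),(2,3),(3,3),(4,3)],
       [(0,4),(1,4),(2,4),(3,4),(4,4)],
       [(0,0),(1,1),(2,2),(3,3),(4,4)], [(0,4),(1,3),(2,2),(3,1),(4,0)]] := by decide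
  simp only [check, check_alt, hr, hl]
  simp only [PySem.List.foldl_ite_add_one]
  simp only [List.countP_cons, List.countP_nil]
  simp only [PySem.Set.issubset_iff, List.forall_mem_cons, PySem.Set.mem_ofList, mem_zeros]
  norm_num [PySem.List.pyGetD_ofNat']
  simp only [count5 r0 h0, count5 r1 h1', count5 r2 h2', count5 r3 h3, count5 r4 h4,
    cnt5_intflat]
  simp only [ite_addone]
  ring

-- ===== VERDICT (by name: the statement is the Claim_ definition above) =====
theorem check_spec : Claim_equal_check := by
  intro c _ hpre
  exact check_eq_alt c hpre.1 hpre.2
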